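-- pv_equiv track=rewrite | github.com/MelaHub/advent-of-code | 2017/day09/garbage.py | clean_garbage
-- ===== SOURCE A (Python) =====
-- IGNORE_NEXT = '!'
--
-- def clean_garbage(word):
--   clean_word = ''
--   i = 0
--   if len(word) < 2:
--     return word
--   word = word[1:-1]
--   while i < len(word):
--     if word[i] == IGNORE_NEXT:
--       i += 1
--     else:
--       clean_word += word[i]
--     i += 1
--   return clean_word
-- ===== SOURCE B (Python) =====
-- def clean_garbage(word):
--   if len(word) < 2:
--     return word
--   pieces = word[1:-1].split('!')
--   out = [pieces[0]]
--   esc = True  # the '!' before the upcoming piece is an active escape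
--   for p in pieces[1:]:
--     if esc:
--       out.append(p[1:])
--       if p == '':
--         esc = False  # the escape consumed the next '!' itself
--     else:
--       out.append(p)
--       esc = True
--   return ''.join(out)
-- ===== Notes on version B (the rewrite author's own statement) =====
-- stated objective: faster
-- what changed: Replaces A's per-character index loop with skip arithmetic and repeated string concatenation by two staged passes: split the core on '!' once, then fold over the pieces with an escape flag, joining once at the end.
import Mathlib
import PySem

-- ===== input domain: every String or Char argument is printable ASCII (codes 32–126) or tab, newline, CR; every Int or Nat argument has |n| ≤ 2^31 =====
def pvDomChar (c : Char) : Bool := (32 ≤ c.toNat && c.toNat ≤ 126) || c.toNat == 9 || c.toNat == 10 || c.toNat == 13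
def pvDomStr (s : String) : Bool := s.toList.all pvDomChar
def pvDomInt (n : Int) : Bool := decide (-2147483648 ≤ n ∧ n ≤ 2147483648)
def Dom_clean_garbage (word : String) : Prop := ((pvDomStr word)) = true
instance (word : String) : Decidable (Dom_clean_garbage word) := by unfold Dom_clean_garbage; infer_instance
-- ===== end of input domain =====

-- B replaces A's character-by-character index loop (with repeated string concatenation) by two
-- staged passes: split the core on '!' once, then fold over the pieces with an escape flag.

-- ===== PORT A =====
-- the 'while i < len(word)' loop of A: index i, accumulator clean_word
def pvALoop (w : List Char) (i : Nat) (acc : List Char) : List Char :=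
  if h : i < w.length then
    if w[i] = '!' then pvALoop w (i + 2) acc
    else pvALoop w (i + 1) (acc ++ [w[i]])
  else acc
termination_by w.length - i
decreasing_by all_goals omega

def clean_garbage (word : String) : String :=
  if word.toList.length < 2 then word
  else String.ofList (pvALoop (PySem.List.slice word.toList (some 1) (some (-1))) 0 [])

-- ===== PORT B =====
-- Source B: pieces = core.split('!'); out = [pieces[0]]; then for p in pieces[1:] with the esc flag.
-- Python's str.split on the single non-empty separator '!' is List.splitOn '!'.
-- the esc-flagged fold of Source B over pieces[1:], started from pieces[0]
def pvBPieces (pieces : List (List Char)) : List Char :=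
  (pieces.tail.foldl
    (fun (st : List Char × Bool) p =>
      if st.2 then (st.1 ++ p.tail, !p.isEmpty) else (st.1 ++ p, true))
    (pieces.headD [], true)).1

def clean_garbage_alt (word : String) : String :=
  if word.toList.length < 2 then word
  else String.ofList (pvBPieces (List.splitOn '!' (PySem.List.slice word.toList (some 1) (some (-1)))))

-- ===== PRECONDITION & SPEC =====
def Spec_clean_garbage (word : String) (out : String) : Prop := out = clean_garbage_alt word
instance (word : String) (out : String) : Decidable (Spec_clean_garbage word out) := by unfold Spec_clean_garbage; infer_instance

-- ===== CLAIM (what is proved, stated in full; the proofs are below) =====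
def Claim_equal_clean_garbage : Prop := ∀ (word : String), Dom_clean_garbage word → Spec_clean_garbage word (clean_garbage word)

-- ===== LEMMAS AND PROOFS =====
-- proof-only middle form: one structural left-to-right pass over the core
def pvBGo : List Char → List Char
  | [] => []
  | c :: rest =>
    if c = '!' then
      match rest with
      | [] => []
      | _ :: rest' => pvBGo rest'
    else c :: pvBGo rest

-- pvBGo in "just saw an unconsumed escape" state
def pvBGoEsc : List Char → List Char
  | [] => []
  | _ :: rest => pvBGo rest

-- recursive form of B's fold over the remaining pieces
def pvGo : List (List Char) → Bool → List Char
  | [], _ => []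
  | p :: ps, esc => if esc then p.tail ++ pvGo ps (!p.isEmpty) else p ++ pvGo ps true

theorem pvALoop_eq_bGo_aux (w : List Char) (n : Nat) :
    ∀ i acc, w.length - i ≤ n → pvALoop w i acc = acc ++ pvBGo (w.drop i) := by
  induction n with
  | zero =>
    intro i acc h
    have hge : ¬ i < w.length := by omega
    rw [pvALoop, dif_neg hge, List.drop_of_length_le (by omega)]
    simp [pvBGo]
  | succ n ih =>
    intro i acc h
    by_cases hi : i < w.length
    · have hdrop : w.drop i = w[i] :: w.drop (i + 1) := List.drop_eq_getElem_cons hi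
      rw [pvALoop, dif_pos hi]
      by_cases hb : w[i] = '!'
      · rw [if_pos hb]
        by_cases hi1 : i + 1 < w.length
        · have hdrop1 : w.drop (i + 1) = w[i + 1] :: w.drop (i + 2) :=
            List.drop_eq_getElem_cons hi1
          rw [ih (i + 2) acc (by omega), hdrop, hdrop1]
          simp [pvBGo, hb]
        · have h2 : ¬ i + 2 < w.length := by omega
          rw [pvALoop, dif_neg h2, hdrop, List.drop_of_length_le (by omega)]
          simp [pvBGo, hb]
      · rw [if_neg hb, ih (i + 1) (acc ++ [w[i]]) (by omega), hdrop]
        conv_rhs => rw [pvBGo.eq_def]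
        simp [hb]
    · rw [pvALoop, dif_neg hi, List.drop_of_length_le (by omega)]
      simp [pvBGo]

theorem pvALoop_eq_bGo (w : List Char) : pvALoop w 0 [] = pvBGo w := by
  simpa using pvALoop_eq_bGo_aux w w.length 0 [] (by omega)

-- B's foldl over pieces equals the recursive pvGo
theorem pvFoldl_eq_go (ps : List (List Char)) :
    ∀ acc esc, (ps.foldl
      (fun (st : List Char × Bool) p =>
        if st.2 then (st.1 ++ p.tail, !p.isEmpty) else (st.1 ++ p, true))
      (acc, esc)).1 = acc ++ pvGo ps esc := by
  induction ps with
  | nil => intro acc esc; simp [pvGo]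
  | cons p ps ih =>
    intro acc esc
    by_cases he : esc <;> simp [pvGo, he, List.foldl_cons, ih]

-- the split-then-fold pass computes the same as the single structural pass
theorem pvSplit_eq_bGo (cs : List Char) :
    ((List.splitOn '!' cs).headD [] ++ pvGo (List.splitOn '!' cs).tail true = pvBGo cs)
    ∧ (pvGo (List.splitOn '!' cs) true = pvBGoEsc cs) := by
  induction cs with
  | nil => simp [List.splitOn, List.splitOnP_nil, pvGo, pvBGo, pvBGoEsc]
  | cons c rest ih =>
    obtain ⟨ih1, ih2⟩ := ih
    by_cases hc : c = '!'
    · subst hc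
      have hsp : List.splitOn '!' ('!' :: rest) = [] :: List.splitOn '!' rest := by
        simp [List.splitOn, List.splitOnP_cons]
      constructor
      · rw [hsp]
        simp only [List.headD, List.tail, List.nil_append]
        rw [ih2]
        cases rest <;> simp [pvBGo, pvBGoEsc]
      · obtain ⟨h, t, hht⟩ := List.exists_cons_of_ne_nil
          (List.splitOnP_ne_nil (fun x => x == '!') rest)
        have hrest : List.splitOn '!' rest = h :: t := hht
        rw [hsp, hrest, pvGo, pvGo]
        rw [hrest] at ih1
        simp only [List.headD, List.tail] at ih1
        simp [pvBGoEsc, ih1]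
    · have hsp : List.splitOn '!' (c :: rest) =
          List.modifyHead (List.cons c) (List.splitOn '!' rest) := by
        simp [List.splitOn, List.splitOnP_cons, hc]
      obtain ⟨h, t, hht⟩ := List.exists_cons_of_ne_nil
        (List.splitOnP_ne_nil (fun x => x == '!') rest)
      have hrest : List.splitOn '!' rest = h :: t := hht
      rw [hrest] at ih1
      simp only [List.headD, List.tail] at ih1
      constructor
      · rw [hsp, hrest]
        simp only [List.modifyHead, List.headD, List.tail, List.cons_append]
        rw [ih1]
        conv_rhs => rw [pvBGo.eq_def]
        simp [hc]
      · rw [hsp, hrest]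
        simp only [List.modifyHead, pvGo, List.isEmpty_cons, Bool.not_false, if_true,
          List.tail_cons]
        simp [pvBGoEsc, ih1]

-- ===== VERDICT (by name: the statement is the Claim_ definition above) =====
theorem clean_garbage_spec : Claim_equal_clean_garbage := by
  intro word _
  unfold Spec_clean_garbage clean_garbage clean_garbage_alt
  split
  · rfl
  · rw [pvALoop_eq_bGo]
    unfold pvBPieces
    rw [pvFoldl_eq_go, (pvSplit_eq_bGo _).1]
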